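-- pv_equiv track=rewrite | github.com/Chimeyy/Bardown | server.py | parse
-- ===== SOURCE A (Python) =====
-- def parse(string):
--     retval = ''
--     for char in string:
--         retval += char if not char == '\n' else ''
--         if char == '\n':
--             yield retval
--             retval = ''
--     if retval:
--         yield retval
-- ===== SOURCE B (Python) =====
-- def parse(string):
--     while True:
--         i = string.find('\n')
--         if i == -1:
--             break
--         yield string[:i]
--         string = string[i + 1:]
--     if string:
--         yield string
-- ===== Notes on version B (the rewrite author's own statement) =====
-- stated objective: faster
-- what changed: B searches for the next newline with str.find and yields whole slices between delimiters, instead of accumulating characters one at a time in a growing buffer with a per-char Python-level branch.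
import Mathlib
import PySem

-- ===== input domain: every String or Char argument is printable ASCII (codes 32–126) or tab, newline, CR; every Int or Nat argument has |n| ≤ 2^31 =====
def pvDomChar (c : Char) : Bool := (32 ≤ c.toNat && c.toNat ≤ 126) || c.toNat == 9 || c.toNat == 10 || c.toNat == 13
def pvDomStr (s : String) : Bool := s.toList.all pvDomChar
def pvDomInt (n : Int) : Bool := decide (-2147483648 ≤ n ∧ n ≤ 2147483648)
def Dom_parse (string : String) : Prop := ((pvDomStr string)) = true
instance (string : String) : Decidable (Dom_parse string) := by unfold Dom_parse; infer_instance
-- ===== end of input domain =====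

-- B yields whole slices between newlines found with str.find instead of A's
-- per-character buffer accumulation; equal return values (A is a generator,
-- compared as the list of yielded segments).

-- ===== PORT A =====
-- state: (yielded segments so far, current retval buffer as chars)
def parseStep (st : List String × List Char) (c : Char) : List String × List Char :=
  let r := st.2 ++ (if c = '\n' then [] else [c])   -- retval += char if not char == '\n' else ''
  if c = '\n' then (st.1 ++ [String.ofList r], []) else (st.1, r)

def parse (string : String) : List String :=
  let st := string.toList.foldl parseStep ([], [])
  if st.2 ≠ [] then st.1 ++ [String.ofList st.2] else st.1   -- if retval: yield retval

-- ===== PORT B =====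
-- loop: i = string.find('\n'); yield string[:i]; string = string[i+1:]
def parseAltGo (cs : List Char) : List String :=
  match h : cs.findIdx? (· = '\n') with
  | some i => String.ofList (cs.take i) :: parseAltGo (cs.drop (i + 1))
  | none => if cs = [] then [] else [String.ofList cs]
termination_by cs.length
decreasing_by
  have hi : i < cs.length := (List.findIdx?_eq_some_iff_findIdx_eq.mp h).1
  simp [List.length_drop]; omega

def parse_alt (string : String) : List String := parseAltGo string.toList

-- ===== PRECONDITION & SPEC =====
def Spec_parse (string : String) (out : List String) : Prop := out = parse_alt string
instance (string : String) (out : List String) : Decidable (Spec_parse string out) := by unfold Spec_parse; infer_instance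

-- ===== CLAIM (what is proved, stated in full; the proofs are below) =====
def Claim_equal_parse : Prop := ∀ (string : String), Dom_parse string → Spec_parse string (parse string)

-- ===== LEMMAS AND PROOFS =====

def parseFinish (st : List String × List Char) : List String :=
  if st.2 ≠ [] then st.1 ++ [String.ofList st.2] else st.1

theorem altGo_some (cs : List Char) (i : Nat)
    (h : cs.findIdx? (· = '\n') = some i) :
    parseAltGo cs = String.ofList (cs.take i) :: parseAltGo (cs.drop (i + 1)) := by
  rw [parseAltGo]
  split
  · rename_i j hj
    rw [h] at hj
    cases hj
    rfl
  · rename_i hn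
    rw [h] at hn
    cases hn

theorem altGo_none (cs : List Char)
    (h : cs.findIdx? (· = '\n') = none) :
    parseAltGo cs = if cs = [] then [] else [String.ofList cs] := by
  rw [parseAltGo]
  split
  · rename_i j hj
    rw [h] at hj
    cases hj
  · rfl

theorem findIdx?_no_newline (r : List Char) (hr : '\n' ∉ r) :
    r.findIdx? (· = '\n') = none := by
  induction r with
  | nil => rfl
  | cons c cs ih =>
    have hc : c ≠ '\n' := fun h => hr (h ▸ List.mem_cons_self)
    simp [List.findIdx?_cons, hc, ih (fun h => hr (List.mem_cons_of_mem _ h))]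

theorem findIdx?_prefix_newline (r cs : List Char) (hr : '\n' ∉ r) :
    (r ++ '\n' :: cs).findIdx? (· = '\n') = some r.length := by
  induction r with
  | nil => simp [List.findIdx?_cons]
  | cons c r' ih =>
    have hc : c ≠ '\n' := fun h => hr (h ▸ List.mem_cons_self)
    simp [List.findIdx?_cons, hc, ih (fun h => hr (List.mem_cons_of_mem _ h))]

theorem parse_invariant (cs : List Char) :
    ∀ (r : List Char) (acc : List String), '\n' ∉ r →
      parseFinish (cs.foldl parseStep (acc, r)) = acc ++ parseAltGo (r ++ cs) := by
  induction cs with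
  | nil =>
    intro r acc hr
    rw [List.append_nil, List.foldl_nil, altGo_none r (findIdx?_no_newline r hr)]
    by_cases h : r = [] <;> simp [parseFinish, h]
  | cons c cs ih =>
    intro r acc hr
    by_cases hc : c = '\n'
    · subst hc
      rw [altGo_some _ r.length (findIdx?_prefix_newline r cs hr)]
      have ht : (r ++ '\n' :: cs).take r.length = r := List.take_left
      have hd : (r ++ '\n' :: cs).drop (r.length + 1) = cs := List.drop_length_add_append 1
      rw [ht, hd]
      have hstep : parseStep (acc, r) '\n' = (acc ++ [String.ofList r], []) := by
        simp [parseStep]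
      rw [List.foldl_cons, hstep, ih [] (acc ++ [String.ofList r]) (by simp)]
      simp
    · have hstep : parseStep (acc, r) c = (acc, r ++ [c]) := by
        simp [parseStep, hc]
      have hr' : '\n' ∉ r ++ [c] := by
        simp only [List.mem_append, List.mem_singleton]
        rintro (h | h)
        · exact hr h
        · exact hc h.symm
      rw [List.foldl_cons, hstep, ih (r ++ [c]) acc hr']
      simp

-- ===== VERDICT (by name: the statement is the Claim_ definition above) =====
theorem parse_spec : Claim_equal_parse := by
  intro s _
  unfold Spec_parse parse parse_alt
  have := parse_invariant s.toList [] [] (by simp)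
  simpa [parseFinish] using this
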